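-- pv_equiv track=rewrite | github.com/trueaseYUKI/python-practies | python_practies/滑动窗口/1423. 可获得的最大点数.py | maxScore
-- ===== SOURCE A (Python) =====
-- from typing import List
--
-- def maxScore(cardPoints: List[int], k: int) -> int:
--
--     # 如果 k == cardPoints.length
--     l = len(cardPoints)
--     if l == k:
--        return sum(cardPoints)
--
--     # 我们使用数学的思想，如果不管其当前的点数的大小，我们不同抽卡的结果组合个数为 K + 1
--
--     # 我们先加右边
--     window_sum = max_sum = sum(cardPoints[0:k])
--     for i in range(0,k):
--         # 移除窗口的数值
--         window_sum -= cardPoints[k - i - 1]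
--         # 加入窗口的数值
--         window_sum += cardPoints[l - i - 1]
--
--         max_sum = max(max_sum,window_sum)
--
--
--     return max_sum
-- ===== SOURCE B (Python) =====
-- def maxScore(cardPoints, k):
--     # Prefix-sum formulation: best = max over t of (first k-t cards) + (last t cards),
--     # both read off one precomputed prefix-sum table.
--     n = len(cardPoints)
--     P = [0]
--     for x in cardPoints:
--         P.append(P[-1] + x)
--     best = P[k]
--     for t in range(1, k + 1):
--         best = max(best, P[k - t] + P[n] - P[n - t])
--     return best
-- ===== Notes on version B (the rewrite author's own statement) =====
-- stated objective: alternative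
-- what changed: B replaces A's sliding-window fold (running window sum updated in place while tracking the max) with a precomputed prefix-sum table from which each of the k+1 split sums is read off in closed form.
-- outside the precondition, e.g. on maxScore([1, 2, 3], -1): A returns 3, B returns 6; on maxScore([1, 2], 5): A raises IndexError, B raises IndexError
import Mathlib
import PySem

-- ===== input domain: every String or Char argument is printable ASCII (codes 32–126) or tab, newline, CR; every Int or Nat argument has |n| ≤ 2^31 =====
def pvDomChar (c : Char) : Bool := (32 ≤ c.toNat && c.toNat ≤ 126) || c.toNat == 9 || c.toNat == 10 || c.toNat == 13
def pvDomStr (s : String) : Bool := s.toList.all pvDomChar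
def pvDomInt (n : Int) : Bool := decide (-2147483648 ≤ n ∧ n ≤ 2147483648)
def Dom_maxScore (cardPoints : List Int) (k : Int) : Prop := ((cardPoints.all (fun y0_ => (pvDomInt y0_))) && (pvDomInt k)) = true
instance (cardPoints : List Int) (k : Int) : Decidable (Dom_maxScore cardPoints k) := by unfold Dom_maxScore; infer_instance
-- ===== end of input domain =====

-- B precomputes a prefix-sum table and takes the max of closed-form split sums read off it
-- (alternative decomposition of the same O(n) task; not claimed faster).

-- ===== PORT A =====
def maxScore (cardPoints : List Int) (k : Int) : Int :=
  let l : Int := cardPoints.length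
  if l = k then cardPoints.sum
  else
    let ws := (PySem.List.slice cardPoints (some 0) (some k)).sum
    let st := (PySem.List.pyRange 0 k 1).foldl
      (fun (p : Int × Int) i =>
        let w := p.1 - PySem.List.pyGetD cardPoints (k - i - 1) 0
                     + PySem.List.pyGetD cardPoints (l - i - 1) 0
        (w, max p.2 w)) (ws, ws)
    st.2

-- ===== PORT B =====
def maxScore_alt (cardPoints : List Int) (k : Int) : Int :=
  let n : Int := cardPoints.length
  let P := cardPoints.foldl
    (fun acc x => acc ++ [PySem.List.pyGetD acc (-1) 0 + x]) [(0 : Int)]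
  let best := PySem.List.pyGetD P k 0
  (PySem.List.pyRange 1 (k + 1) 1).foldl
    (fun b t => max b (PySem.List.pyGetD P (k - t) 0
                       + PySem.List.pyGetD P n 0
                       - PySem.List.pyGetD P (n - t) 0)) best

-- ===== PRECONDITION & SPEC =====
-- Pre_ restricts to the task's natural domain 0 ≤ k ≤ len(cardPoints): for k > len A raises
-- IndexError, and for k < 0 (a meaningless card count) both programs' values are accidents of
-- Python's negative indexing/slicing, which neither program's purpose specifies.
def Pre_maxScore (cardPoints : List Int) (k : Int) : Prop :=
  0 ≤ k ∧ k ≤ cardPoints.length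
instance (cardPoints : List Int) (k : Int) : Decidable (Pre_maxScore cardPoints k) := by
  unfold Pre_maxScore; infer_instance
def pvWitness_maxScore : List Int × Int := ([1, 2, 3, 4], 2)
def Spec_maxScore (cardPoints : List Int) (k : Int) (out : Int) : Prop := out = maxScore_alt cardPoints k
instance (cardPoints : List Int) (k : Int) (out : Int) : Decidable (Spec_maxScore cardPoints k out) := by unfold Spec_maxScore; infer_instance

-- ===== CLAIM (what is proved, stated in full; the proofs are below) =====
def Claim_equal_maxScore : Prop := ∀ (cardPoints : List Int) (k : Int), Dom_maxScore cardPoints k → Pre_maxScore cardPoints k → Spec_maxScore cardPoints k (maxScore cardPoints k)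

-- ===== LEMMAS AND PROOFS =====

lemma sup'_range_succ (g : Nat → Int) (s : Nat) :
    (Finset.range (s + 1 + 1)).sup' (by simp) g
      = max ((Finset.range (s + 1)).sup' (by simp) g) (g (s + 1)) := by
  apply le_antisymm
  · apply Finset.sup'_le
    intro b hb
    simp at hb
    by_cases hbe : b = s + 1
    · subst hbe
      exact le_max_right _ _
    · refine le_trans ?_ (le_max_left _ _)
      apply Finset.le_sup'
      simp
      omega
  · apply max_le
    · apply Finset.sup'_le
      intro b hb
      apply Finset.le_sup'
      simp at hb ⊢
      omega
    · apply Finset.le_sup'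
      simp

-- A's split sum: first (kn - t) cards plus last t cards
def pvF (xs : List Int) (kn t : Nat) : Int :=
  (xs.take (kn - t)).sum + (xs.drop (xs.length - t)).sum

lemma pvF_step (xs : List Int) (kn t : Nat) (hk : kn < xs.length) (ht : t < kn) :
    pvF xs kn t - xs.getD (kn - t - 1) 0 + xs.getD (xs.length - t - 1) 0
      = pvF xs kn (t + 1) := by
  have h1 : kn - t - 1 < xs.length := by omega
  have h2 : xs.length - t - 1 < xs.length := by omega
  have htake : (xs.take (kn - t)).sum = (xs.take (kn - t - 1)).sum + xs.getD (kn - t - 1) 0 := by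
    have := List.sum_take_succ xs (kn - t - 1) h1
    rw [List.getD_eq_getElem xs 0 h1]
    have he : kn - t - 1 + 1 = kn - t := by omega
    rw [he] at this
    omega
  have hdrop : xs.drop (xs.length - (t + 1))
      = xs.getD (xs.length - t - 1) 0 :: xs.drop (xs.length - t) := by
    rw [List.getD_eq_getElem xs 0 h2]
    have he : xs.length - (t + 1) = xs.length - t - 1 := by omega
    have he2 : xs.length - t - 1 + 1 = xs.length - t := by omega
    rw [he, List.drop_eq_getElem_cons h2, he2]
  unfold pvF
  have he3 : kn - (t + 1) = kn - t - 1 := by omega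
  rw [he3, hdrop]
  simp only [List.sum_cons]
  omega

-- A's fold computes the running split sum and the max of all split sums seen
lemma foldA (xs : List Int) (k : Int) (hk0 : 0 ≤ k) (hk : k < xs.length) :
    ∀ t ≤ k.toNat,
      ((List.range t).map (fun j : Nat => (j : Int))).foldl
        (fun (p : Int × Int) i =>
          (p.1 - PySem.List.pyGetD xs (k - i - 1) 0
               + PySem.List.pyGetD xs ((xs.length : Int) - i - 1) 0,
           max p.2 (p.1 - PySem.List.pyGetD xs (k - i - 1) 0
               + PySem.List.pyGetD xs ((xs.length : Int) - i - 1) 0)))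
        (pvF xs k.toNat 0, pvF xs k.toNat 0)
      = (pvF xs k.toNat t, (Finset.range (t + 1)).sup' (by simp) (pvF xs k.toNat)) := by
  intro t ht
  induction t with
  | zero => simp [Finset.sup'_singleton]
  | succ t ih =>
    have ht' : t ≤ k.toNat := by omega
    rw [List.range_succ, List.map_append, List.foldl_append, ih ht']
    simp only [List.map_cons, List.map_nil, List.foldl_cons, List.foldl_nil]
    have hg1 : PySem.List.pyGetD xs (k - (t : Int) - 1) 0
        = xs.getD (k.toNat - t - 1) 0 := by
      have he : k - (t : Int) - 1 = ((k.toNat - t - 1 : Nat) : Int) := by omega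
      rw [he, PySem.List.pyGetD_natCast]
    have hg2 : PySem.List.pyGetD xs ((xs.length : Int) - (t : Int) - 1) 0
        = xs.getD (xs.length - t - 1) 0 := by
      have he : (xs.length : Int) - (t : Int) - 1 = ((xs.length - t - 1 : Nat) : Int) := by
        omega
      rw [he, PySem.List.pyGetD_natCast]
    rw [hg1, hg2]
    have hstep := pvF_step xs k.toNat t (by omega) (by omega)
    have hsup : max ((Finset.range (t + 1)).sup' (by simp) (pvF xs k.toNat))
          (pvF xs k.toNat (t + 1))
        = (Finset.range (t + 1 + 1)).sup' (by simp) (pvF xs k.toNat) := by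
      rw [sup'_range_succ]
    rw [hstep, Prod.mk.injEq]
    exact ⟨rfl, hsup⟩

lemma A_eq_of_lt (xs : List Int) (k : Int) (hk0 : 0 ≤ k) (hkl : k < xs.length) :
    maxScore xs k
      = (Finset.range (k.toNat + 1)).sup' (by simp) (pvF xs k.toNat) := by
  have hne : (xs.length : Int) ≠ k := by omega
  have hrange : PySem.List.pyRange 0 k 1
      = (List.range k.toNat).map (fun j : Nat => (j : Int)) := by
    rw [PySem.List.pyRange_one]
    have he : (k - 0).toNat = k.toNat := by omega
    rw [he]
    simp
  have hws : (PySem.List.slice xs (some 0) (some k)).sum = pvF xs k.toNat 0 := by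
    rw [PySem.List.slice_zero_start, PySem.List.slice_to xs hk0]
    unfold pvF
    simp
  unfold maxScore
  rw [if_neg hne]
  simp only [hrange, hws]
  rw [foldA xs k hk0 hkl k.toNat (le_refl _)]

-- B's prefix table is the list of prefix sums
lemma prefixP (xs : List Int) :
    xs.foldl (fun acc x => acc ++ [PySem.List.pyGetD acc (-1) 0 + x]) [(0 : Int)]
      = (List.range (xs.length + 1)).map (fun i => (xs.take i).sum) := by
  induction xs using List.reverseRecOn with
  | nil => simp [List.range_succ]
  | append_singleton xs x ih =>
    rw [List.foldl_append, ih]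
    simp only [List.foldl_cons, List.foldl_nil]
    have hsplit : (List.range (xs.length + 1)).map (fun i => (xs.take i).sum)
        = (List.range xs.length).map (fun i => (xs.take i).sum) ++ [xs.sum] := by
      rw [List.range_succ, List.map_append]
      simp
    rw [hsplit, PySem.List.pyGetD_neg_one_append_singleton, ← hsplit]
    rw [List.length_append, List.length_singleton]
    rw [List.range_succ (n := xs.length + 1), List.map_append]
    congr 1
    · apply List.map_congr_left
      intro i hi
      simp only [List.mem_range] at hi
      rw [List.take_append_of_le_length (by omega)]
    · simp [List.take_append]
      rw [List.take_of_length_le (by omega)]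

-- reading the prefix table at an in-range index gives the prefix sum
lemma readP' (xs : List Int) (j : Int) (h0 : 0 ≤ j) (hj : j ≤ (xs.length : Int)) :
    PySem.List.pyGetD ((List.range (xs.length + 1)).map (fun i => (xs.take i).sum)) j 0
      = (xs.take j.toNat).sum := by
  have he : j = ((j.toNat : Nat) : Int) := by omega
  conv_lhs => rw [he]
  rw [PySem.List.pyGetD_natCast, PySem.List.getD_map_range _ _ _ _ (by omega)]

-- the max-fold over t = 1..s starting at g 0 computes the sup of g over 0..s
lemma fold_max_sup (f : Int → Int) (g : Nat → Int) (kn : Nat)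
    (hf : ∀ t : Nat, 1 ≤ t → t ≤ kn → f (t : Int) = g t) :
    ∀ s ≤ kn,
      ((List.range s).map (fun j : Nat => (1 : Int) + (j : Int))).foldl
        (fun b t => max b (f t)) (g 0)
      = (Finset.range (s + 1)).sup' (by simp) g := by
  intro s hs
  induction s with
  | zero => simp [Finset.sup'_singleton]
  | succ s ih =>
    rw [List.range_succ, List.map_append, List.foldl_append, ih (by omega)]
    simp only [List.map_cons, List.map_nil, List.foldl_cons, List.foldl_nil]
    have he : (1 : Int) + (s : Int) = ((s + 1 : Nat) : Int) := by push_cast; ring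
    rw [he, hf (s + 1) (by omega) (by omega), sup'_range_succ]

lemma B_eq (xs : List Int) (k : Int) (hk0 : 0 ≤ k) (hkl : k ≤ xs.length) :
    maxScore_alt xs k
      = (Finset.range (k.toNat + 1)).sup' (by simp) (pvF xs k.toNat) := by
  have hrange : PySem.List.pyRange 1 (k + 1) 1
      = (List.range k.toNat).map (fun j : Nat => (1 : Int) + (j : Int)) := by
    rw [PySem.List.pyRange_one]
    have he : (k + 1 - 1).toNat = k.toNat := by omega
    rw [he]
  simp only [maxScore_alt, prefixP, hrange]
  have hbest : PySem.List.pyGetD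
      ((List.range (xs.length + 1)).map (fun i => (xs.take i).sum)) k 0
      = pvF xs k.toNat 0 := by
    rw [readP' xs k hk0 hkl]
    unfold pvF
    simp
  rw [hbest]
  apply fold_max_sup _ _ k.toNat _ k.toNat (le_refl _)
  intro t ht1 htk
  rw [readP' xs (k - (t : Int)) (by omega) (by omega),
      readP' xs ((xs.length : Int)) (by omega) (le_refl _),
      readP' xs ((xs.length : Int) - (t : Int)) (by omega) (by omega)]
  have e1 : (k - (t : Int)).toNat = k.toNat - t := by omega
  have e2 : ((xs.length : Int)).toNat = xs.length := by omega
  have e3 : ((xs.length : Int) - (t : Int)).toNat = xs.length - t := by omega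
  rw [e1, e2, e3, List.take_length]
  unfold pvF
  have hsum := List.sum_take_add_sum_drop xs (xs.length - t)
  omega

lemma pvF_full (xs : List Int) (t : Nat) : pvF xs xs.length t = xs.sum := by
  unfold pvF
  have := List.sum_take_add_sum_drop xs (xs.length - t)
  omega

-- ===== VERDICT (by name: the statement is the Claim_ definition above) =====
theorem maxScore_spec : Claim_equal_maxScore := by
  intro xs k _ hpre
  obtain ⟨hk0, hkl⟩ := hpre
  unfold Spec_maxScore
  rw [B_eq xs k hk0 hkl]
  by_cases heq : k = (xs.length : Int)
  · subst heq
    unfold maxScore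
    rw [if_pos rfl]
    have hc : (Finset.range ((xs.length : Int).toNat + 1)).sup' (by simp)
          (pvF xs (xs.length : Int).toNat)
        = (Finset.range ((xs.length : Int).toNat + 1)).sup' (by simp)
          (fun _ => xs.sum) := by
      apply Finset.sup'_congr _ rfl
      intro t htm
      simp only [Finset.mem_range, Nat.lt_succ_iff] at htm
      have hkn : (xs.length : Int).toNat = xs.length := by omega
      rw [hkn]
      exact pvF_full xs t
    rw [hc, Finset.sup'_const]
  · have hlt : k < xs.length := lt_of_le_of_ne hkl (by omega)
    rw [A_eq_of_lt xs k hk0 hlt]
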